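-- pv_equiv track=rewrite | github.com/danielbraithwt/Logical-Neural-Networks | Gate Paramaterisations/LNF Network Approach/Experements/DataSets/Iris/DescreteIrisClassifier.py | apply_bin
-- ===== SOURCE A (Python) =====
-- def apply_bin(instance, b, i):
--     val = instance[i]
--     bin_num = 0
--     for idx in range(len(b) - 1):
--         if val < b[bin_num]:
--             break
--         bin_num += 1
--
--     if val > b[-1]:
--         bin_num += 1
--
--     return bin_num
-- ===== SOURCE B (Python) =====
-- def apply_bin(instance, b, i):
--     val = instance[i]
--     body, last = b[:-1], b[-1]
--     # scan right-to-left, keeping the leftmost boundary index exceeding val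
--     k = len(body)
--     for j in range(len(body) - 1, -1, -1):
--         if body[j] > val:
--             k = j
--     return k + (1 if val > last else 0)
-- ===== Notes on version B (the rewrite author's own statement) =====
-- stated objective: alternative
-- what changed: Replaces A's left-to-right index-tracking loop with break by a right-to-left scan over b[:-1] that maintains the leftmost boundary index exceeding val as an accumulator (no break, opposite traversal order), combined arithmetically with the last-boundary check.
import Mathlib
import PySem

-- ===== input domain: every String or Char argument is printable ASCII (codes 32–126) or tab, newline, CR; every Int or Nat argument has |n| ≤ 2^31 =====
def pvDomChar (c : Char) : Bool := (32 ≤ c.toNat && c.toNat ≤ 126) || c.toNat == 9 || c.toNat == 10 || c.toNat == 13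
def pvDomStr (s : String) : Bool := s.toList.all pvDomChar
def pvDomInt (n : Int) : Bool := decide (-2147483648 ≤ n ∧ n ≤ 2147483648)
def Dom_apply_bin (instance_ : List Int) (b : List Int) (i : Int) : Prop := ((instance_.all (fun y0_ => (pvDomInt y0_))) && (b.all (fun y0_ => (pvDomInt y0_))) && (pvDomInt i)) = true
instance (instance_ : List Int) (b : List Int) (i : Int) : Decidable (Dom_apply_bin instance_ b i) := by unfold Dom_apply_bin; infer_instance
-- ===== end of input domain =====

-- B replaces A's left-to-right break loop by a right-to-left scan over b[:-1] that keeps the leftmost boundary index exceeding val; objective: alternative (order of traversal does not matter, proved).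


-- ===== PORT A =====
-- the 'for idx in range(len(b) - 1)' loop with break: fuel = remaining iterations,
-- binNum = Python's bin_num (always an in-range index into b while the loop runs)
def pvLoopA (val : Int) (b : List Int) : Nat → Int → Int
  | 0, binNum => binNum
  | n + 1, binNum =>
      if val < (PySem.List.pyGet? b binNum).getD 0 then binNum
      else pvLoopA val b n (binNum + 1)

def apply_bin (instance_ : List Int) (b : List Int) (i : Int) : Int :=
  match PySem.List.pyGet? instance_ i, PySem.List.pyGet? b (-1) with
  | some val, some last =>
      let bin_num := pvLoopA val b (b.length - 1) 0
      if val > last then bin_num + 1 else bin_num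
  | _, _ => 0   -- IndexError in Python: outside Pre_

-- ===== PORT B =====
-- Source B's backward loop 'for j in range(len(body) - 1, -1, -1)': fuel m = number of
-- indices still to visit (current j is m - 1), k = Python's k (leftmost hit so far)
def pvLoopB (val : Int) (body : List Int) : Nat → Int → Int
  | 0, k => k
  | m + 1, k =>
      pvLoopB val body m
        (if val < (PySem.List.pyGet? body (m : Int)).getD 0 then (m : Int) else k)

-- body = b[:-1] (PySem.List.slice … (some (-1))); none cases of pyGet? = IndexError, outside Pre_
def apply_bin_alt (instance_ : List Int) (b : List Int) (i : Int) : Int :=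
  (((PySem.List.pyGet? instance_ i).bind fun val =>
    (PySem.List.pyGet? b (-1)).map fun last =>
      let body := PySem.List.slice b none (some (-1))
      let k := pvLoopB val body body.length ((body.length : Nat) : Int)
      k + (if val > last then 1 else 0))).getD 0

-- ===== PRECONDITION & SPEC =====
-- Pre_ excludes exactly the inputs where Python raises IndexError: i out of range for instance, or b empty (b[-1]).
def Pre_apply_bin (instance_ : List Int) (b : List Int) (i : Int) : Prop :=
  PySem.Raise.InRange instance_.length i ∧ b ≠ []
instance (instance_ : List Int) (b : List Int) (i : Int) : Decidable (Pre_apply_bin instance_ b i) := by unfold Pre_apply_bin; infer_instance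
def pvWitness_apply_bin : List Int × List Int × Int := ([5], [1, 4, 7], 0)

def Spec_apply_bin (instance_ : List Int) (b : List Int) (i : Int) (out : Int) : Prop := out = apply_bin_alt instance_ b i
instance (instance_ : List Int) (b : List Int) (i : Int) (out : Int) : Decidable (Spec_apply_bin instance_ b i out) := by unfold Spec_apply_bin; infer_instance

-- ===== CLAIM (what is proved, stated in full; the proofs are below) =====
def Claim_equal_apply_bin : Prop := ∀ (instance_ : List Int) (b : List Int) (i : Int), Dom_apply_bin instance_ b i → Pre_apply_bin instance_ b i → Spec_apply_bin instance_ b i (apply_bin instance_ b i)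

-- ===== LEMMAS AND PROOFS =====

-- A's loop/prefix correspondence: starting at index j with fuel f, j + f ≤ len b,
-- the loop returns j plus the prefix length of the next f elements
set_option maxRecDepth 8000 in
theorem pvLoopA_eq_findIdx (val : Int) (b : List Int) :
    ∀ (f j : Nat), j + f ≤ b.length →
      pvLoopA val b f (j : Int)
        = (j : Int) + (((b.drop j).take f).findIdx (fun x => decide (val < x)) : Int) := by
  intro f
  induction f with
  | zero => intro j _; simp [pvLoopA, List.findIdx]
  | succ n ih =>
    intro j hj
    have hjlt : j < b.length := by omega
    have hdrop : b.drop j = b[j] :: b.drop (j + 1) := List.drop_eq_getElem_cons hjlt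
    have hget : PySem.List.pyGet? b (j : Int) = some b[j] := by
      simpa using PySem.List.pyGet?_ofNat (xs := b) (n := j) hjlt
    by_cases hlt : val < b[j]
    · simp only [pvLoopA, hget, Option.getD_some, if_pos hlt]
      rw [hdrop]
      simp only [List.take_succ_cons, List.findIdx_cons, decide_eq_true hlt, cond_true]
      push_cast; ring
    · have h1 : ((j : Int) + 1) = ((j + 1 : Nat) : Int) := by push_cast; ring
      simp only [pvLoopA, hget, Option.getD_some, if_neg hlt]
      rw [h1, ih (j + 1) (by omega), hdrop]
      simp only [List.take_succ_cons, List.findIdx_cons, decide_eq_false hlt, cond_false]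
      push_cast; ring

-- B's loop: with m indices still to visit, the backward scan over body[0..m-1] returns the
-- first index of body.take m whose element exceeds val, or the accumulator k if there is none
theorem pvLoopB_eq_findIdx (val : Int) (body : List Int) :
    ∀ (m : Nat) (k : Int), m ≤ body.length →
      pvLoopB val body m k
        = (if (body.take m).findIdx (fun x => decide (val < x)) < m
           then (((body.take m).findIdx (fun x => decide (val < x)) : Nat) : Int) else k) := by
  intro m
  induction m with
  | zero => intro k _; simp [pvLoopB]
  | succ n ih =>
    intro k hm
    have hn : n < body.length := by omega
    have hget : PySem.List.pyGet? body (n : Int) = some body[n] := by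
      simpa using PySem.List.pyGet?_ofNat (xs := body) (n := n) hn
    have htake : body.take (n + 1) = body.take n ++ [body[n]] := by
      rw [List.take_succ]; simp [List.getElem?_eq_getElem hn]
    have hlen : (body.take n).length = n := List.length_take_of_le (by omega)
    have hle : (body.take n).findIdx (fun x => decide (val < x)) ≤ n := by
      simpa [hlen] using
        (List.findIdx_le_length (p := fun x => decide (val < x)) (xs := body.take n))
    simp only [pvLoopB, hget, Option.getD_some]
    rw [ih _ hn.le, htake, List.findIdx_append, hlen]
    by_cases hlt : val < body[n] <;>
      simp only [List.findIdx_cons, decide_eq_true, decide_eq_false, hlt, if_true, if_false,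
        cond_true, cond_false, List.findIdx_nil] <;>
      split_ifs <;> simp_all <;> omega

-- ===== VERDICT (by name: the statement is the Claim_ definition above) =====
theorem apply_bin_spec : Claim_equal_apply_bin := by
  intro instance_ b i _ hpre
  obtain ⟨hin, hb⟩ := hpre
  unfold Spec_apply_bin apply_bin apply_bin_alt
  obtain ⟨val, hval⟩ : ∃ v, PySem.List.pyGet? instance_ i = some v := by
    rcases Option.ne_none_iff_exists'.mp (by
      rw [Ne, PySem.List.pyGet?_eq_none_iff]; exact not_not.mpr hin) with ⟨v, hv⟩
    exact ⟨v, hv⟩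
  obtain ⟨last, hlast⟩ : ∃ v, PySem.List.pyGet? b (-1) = some v := by
    rcases Option.ne_none_iff_exists'.mp (by
      rw [Ne, PySem.List.pyGet?_eq_none_iff]
      have hlen : 0 < b.length := List.length_pos_iff.mpr hb
      have : PySem.Raise.InRange b.length (-1) := by
        unfold PySem.Raise.InRange; omega
      exact not_not.mpr this) with ⟨v, hv⟩
    exact ⟨v, hv⟩
  rw [hval, hlast]
  simp only [Option.bind_some, Option.map_some, Option.getD_some]
  -- A side: break loop = findIdx over b.dropLast
  have hA := pvLoopA_eq_findIdx val b (b.length - 1) 0 (by omega)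
  simp only [List.drop_zero, ← List.dropLast_eq_take, Nat.cast_zero, zero_add] at hA
  -- B side: backward scan started at k = len = findIdx over body = b.dropLast
  have hbody : PySem.List.slice b none (some (-1)) = b.dropLast := PySem.List.slice_to_neg_one b
  set body := b.dropLast with hbd
  have hB := pvLoopB_eq_findIdx val body body.length ((body.length : Nat) : Int) le_rfl
  rw [List.take_length] at hB
  have hle : body.findIdx (fun x => decide (val < x)) ≤ body.length :=
    List.findIdx_le_length
  have hBval : pvLoopB val body body.length ((body.length : Nat) : Int)
      = ((body.findIdx (fun x => decide (val < x)) : Nat) : Int) := by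
    rw [hB]; split_ifs with h
    · rfl
    · have : body.findIdx (fun x => decide (val < x)) = body.length := by omega
      rw [this]
  simp only [hbody, hBval, hA]
  split_ifs <;> ring
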